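-- pv_equiv track=rewrite | github.com/jack-chaudier/stark | scripts/quotient-thresholds/phase_transition_sweep.py | enumerate_witness_states
-- ===== SOURCE A (Python) =====
-- from typing import DefaultDict, Dict, Iterable, List, Sequence, Tuple
--
-- BOT = -1
--
-- def enumerate_witness_states(k: int, p: int) -> Tuple[Tuple[int, Tuple[int, ...]], ...]:
--     states: List[Tuple[int, Tuple[int, ...]]] = []
--
--     def walk(depth: int, prefix: List[int]) -> None:
--         if len(prefix) == p:
--             states.append((depth, tuple(prefix)))
--             return
--         for coord in range(BOT, depth + 1):
--             prefix.append(coord)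
--             walk(depth, prefix)
--             prefix.pop()
--
--     for depth in range(k + 1):
--         walk(depth, [])
--     return tuple(states)
-- ===== SOURCE B (Python) =====
-- from itertools import product
--
-- BOT = -1
--
-- def enumerate_witness_states(k, p):
--     return tuple(
--         (depth, combo)
--         for depth in range(k + 1)
--         for combo in product(range(BOT, depth + 1), repeat=p)
--     )
-- ===== Notes on version B (the rewrite author's own statement) =====
-- stated objective: idiomatic
-- what changed: Replaces the recursive walk with a mutable backtracking prefix by a flat generator expression over itertools.product(range(BOT, depth+1), repeat=p), which emits tuples in the same lexicographic order.
import Mathlib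
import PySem

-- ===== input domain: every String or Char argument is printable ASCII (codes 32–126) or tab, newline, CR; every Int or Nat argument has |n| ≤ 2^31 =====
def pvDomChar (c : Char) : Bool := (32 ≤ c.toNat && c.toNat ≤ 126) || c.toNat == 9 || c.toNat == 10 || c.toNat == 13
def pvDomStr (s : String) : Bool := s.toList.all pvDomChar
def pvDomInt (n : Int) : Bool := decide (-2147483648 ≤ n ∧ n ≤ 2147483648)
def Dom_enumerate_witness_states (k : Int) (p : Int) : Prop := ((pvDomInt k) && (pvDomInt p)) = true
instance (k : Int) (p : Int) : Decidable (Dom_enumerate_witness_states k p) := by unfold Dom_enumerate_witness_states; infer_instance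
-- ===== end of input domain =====

-- ===== PORT A =====
-- B replaces A's recursive backtracking walk by a flat product enumeration (idiomatic, same cost).
-- 'walkA' is A's inner 'walk'; the Nat fuel (p.toNat at the top call) only guards totality:
-- under Pre_ (p ≥ 0 whenever the outer loop runs) it is never exhausted before len(pref) == p.
def walkA (p : Int) (fuel : Nat) (depth : Int) (pref : List Int) : List (Int × List Int) :=
  if (pref.length : Int) = p then [(depth, pref)]
  else match fuel with
    | 0 => []
    | Nat.succ f =>
      (PySem.List.pyRange (-1) (depth + 1) 1).foldl
        (fun acc coord => acc ++ walkA p f depth (pref ++ [coord])) []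

def enumerate_witness_states (k : Int) (p : Int) : List (Int × List Int) :=
  (PySem.List.pyRange 0 (k + 1) 1).foldl
    (fun states depth => states ++ walkA p p.toNat depth []) []

-- ===== PORT B =====
-- itertools.product(coords, repeat=n), leftmost coordinate varies slowest
def prodRep (coords : List Int) : Nat → List (List Int)
  | 0 => [[]]
  | Nat.succ n => coords.flatMap (fun x => (prodRep coords n).map (fun rest => x :: rest))

def enumerate_witness_states_alt (k : Int) (p : Int) : List (Int × List Int) :=
  (PySem.List.pyRange 0 (k + 1) 1).flatMap (fun depth =>
    (prodRep (PySem.List.pyRange (-1) (depth + 1) 1) p.toNat).map (fun combo => (depth, combo)))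

-- ===== PRECONDITION & SPEC =====
-- Pre_ excludes k ≥ 0 with p < 0, where A's recursion never terminates (RecursionError)
-- and B's itertools.product raises ValueError.
def Pre_enumerate_witness_states (k : Int) (p : Int) : Prop := 0 ≤ p ∨ k < 0
instance (k : Int) (p : Int) : Decidable (Pre_enumerate_witness_states k p) := by unfold Pre_enumerate_witness_states; infer_instance
def pvWitness_enumerate_witness_states : Int × Int := (2, 2)
def Spec_enumerate_witness_states (k : Int) (p : Int) (out : List (Int × List Int)) : Prop := out = enumerate_witness_states_alt k p
instance (k : Int) (p : Int) (out : List (Int × List Int)) : Decidable (Spec_enumerate_witness_states k p out) := by unfold Spec_enumerate_witness_states; infer_instance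

-- ===== CLAIM (what is proved, stated in full; the proofs are below) =====
def Claim_equal_enumerate_witness_states : Prop := ∀ (k : Int) (p : Int), Dom_enumerate_witness_states k p → Pre_enumerate_witness_states k p → Spec_enumerate_witness_states k p (enumerate_witness_states k p)

-- ===== LEMMAS AND PROOFS =====

-- the inner loop of walkA is a flatMap
lemma walkA_succ (p : Int) (f : Nat) (depth : Int) (pref : List Int)
    (h : (pref.length : Int) ≠ p) :
    walkA p (Nat.succ f) depth pref
      = (PySem.List.pyRange (-1) (depth + 1) 1).flatMap
          (fun coord => walkA p f depth (pref ++ [coord])) := by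
  rw [walkA, if_neg h]
  rw [PySem.List.foldl_append_eq_flatMap, List.nil_append]

-- main invariant: with exactly n coordinates left to choose, walkA enumerates prodRep
lemma walkA_eq_prodRep (p : Int) (n : Nat) (depth : Int) (pref : List Int)
    (h : (pref.length : Int) + n = p) :
    walkA p n depth pref
      = (prodRep (PySem.List.pyRange (-1) (depth + 1) 1) n).map
          (fun rest => (depth, pref ++ rest)) := by
  induction n generalizing pref with
  | zero =>
    rw [walkA, if_pos (by omega)]
    simp [prodRep]
  | succ m ih =>
    rw [walkA_succ p m depth pref (by omega)]
    simp only [prodRep, List.map_flatMap, List.map_map]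
    refine List.flatMap_congr (fun coord _ => ?_)
    rw [ih (pref ++ [coord]) (by simp; omega)]
    simp [Function.comp]

-- ===== VERDICT (by name: the statement is the Claim_ definition above) =====
theorem enumerate_witness_states_spec : Claim_equal_enumerate_witness_states := by
  intro k p _ hpre
  unfold Spec_enumerate_witness_states enumerate_witness_states enumerate_witness_states_alt
  rw [PySem.List.foldl_append_eq_flatMap, List.nil_append]
  refine List.flatMap_congr (fun depth hd => ?_)
  rcases hpre with hp | hk
  · rw [walkA_eq_prodRep p p.toNat depth [] (by simp; omega)]
    simp
  · exfalso
    rw [PySem.List.mem_pyRange_one] at hd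
    omega
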